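-- pv_equiv track=rewrite | github.com/shrutimv/paper-trading-app | API/logic.py | pick_best_symbol
-- ===== SOURCE A (Python) =====
-- from typing import List, Dict, Tuple, Any
--
-- def pick_best_symbol(results: List[dict], company_name: str, preferred: str = "Auto") -> dict:
--     """
--     Choose the best matching result from search results. Tries exact shortname/symbol,
--     then preferred exchange matches, then equity/ETF preference, then first.
--     """
--     if not results:
--         return None
--     pref = (preferred or "Auto").upper()
--     # exact match shortname or symbol
--     for r in results:
--         if r.get("shortname") and company_name.lower() == r["shortname"].lower():
--             return r
--         if r.get("symbol") and company_name.lower() == r["symbol"].lower():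
--             return r
--     # prefer exchange matches
--     if pref in ("NSE", "BSE"):
--         for r in results:
--             exch = (r.get("exchange") or "").upper()
--             if pref == "NSE" and ("NS" in exch or "NSE" in exch):
--                 return r
--             if pref == "BSE" and ("BO" in exch or "BSE" in exch or "BOM" in exch):
--                 return r
--         # fallback check symbol suffix .NS or .BO
--         for r in results:
--             sym = (r.get("symbol") or "").upper()
--             if pref == "NSE" and sym.endswith(".NS"):
--                 return r
--             if pref == "BSE" and sym.endswith(".BO"):
--                 return r
--     # prefer equities and ETFs
--     for r in results:
--         if r.get("quoteType") in ("EQUITY", "ETF", "MUTUALFUND"):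
--             return r
--     return results[0]
-- ===== SOURCE B (Python) =====
-- def pick_best_symbol(results, company_name, preferred="Auto"):
--     if not results:
--         return None
--     pref = (preferred or "Auto").upper()
--     cn = company_name.lower()
--
--     def rank(r):
--         sn = r.get("shortname")
--         sym = r.get("symbol")
--         if (sn and cn == sn.lower()) or (sym and cn == sym.lower()):
--             return 0
--         exch = (r.get("exchange") or "").upper()
--         if (pref == "NSE" and ("NS" in exch or "NSE" in exch)) or \
--            (pref == "BSE" and ("BO" in exch or "BSE" in exch or "BOM" in exch)):
--             return 1
--         s = (sym or "").upper()
--         if (pref == "NSE" and s.endswith(".NS")) or (pref == "BSE" and s.endswith(".BO")):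
--             return 2
--         if r.get("quoteType") in ("EQUITY", "ETF", "MUTUALFUND"):
--             return 3
--         return 4
--
--     best, best_rank = results[0], rank(results[0])
--     for r in results[1:]:
--         k = rank(r)
--         if k < best_rank:
--             best, best_rank = r, k
--     return best
-- ===== Notes on version B (the rewrite author's own statement) =====
-- stated objective: alternative
-- what changed: Replaced A's four sequential scans over the results list by a single pass that assigns each result an integer priority rank (0 exact name match, 1 preferred-exchange match, 2 symbol-suffix match, 3 equity/ETF/mutual-fund, 4 unranked) and keeps the first result of minimal rank, falling back to results[0] automatically via rank 4.
import Mathlib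
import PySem

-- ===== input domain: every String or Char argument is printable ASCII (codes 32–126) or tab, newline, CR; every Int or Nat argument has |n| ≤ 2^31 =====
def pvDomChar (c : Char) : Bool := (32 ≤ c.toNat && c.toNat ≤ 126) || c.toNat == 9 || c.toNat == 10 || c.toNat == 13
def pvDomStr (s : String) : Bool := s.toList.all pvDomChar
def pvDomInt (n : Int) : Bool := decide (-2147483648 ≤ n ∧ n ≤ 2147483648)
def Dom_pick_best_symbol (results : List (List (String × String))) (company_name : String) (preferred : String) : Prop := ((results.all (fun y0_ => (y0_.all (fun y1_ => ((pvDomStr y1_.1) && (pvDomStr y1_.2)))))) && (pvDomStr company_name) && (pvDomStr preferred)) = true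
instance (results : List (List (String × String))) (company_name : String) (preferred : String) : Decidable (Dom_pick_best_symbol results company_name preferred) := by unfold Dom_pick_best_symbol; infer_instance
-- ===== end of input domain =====

-- B replaces A's four sequential scans by a single pass that tracks the first result of
-- minimal priority rank (objective: alternative/simpler single-pass decomposition; return value only).

-- shared primitive: Python r.get(k) on a dict given as an association list (first match)
def pvGet (r : List (String × String)) (k : String) : Option String :=
  PySem.Dict.get? (PySem.Dict.mk r) k

-- pref = (preferred or "Auto").upper()
def pvPref (preferred : String) : String :=
  PySem.Str.upper (if preferred == "" then "Auto" else preferred)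

-- the four match conditions of A's tiers (loop bodies, used verbatim by both ports)
def pvP0 (cn : String) (r : List (String × String)) : Bool :=
  (match pvGet r "shortname" with
   | some s => !(s == "") && (cn == PySem.Str.lower s)
   | none => false) ||
  (match pvGet r "symbol" with
   | some s => !(s == "") && (cn == PySem.Str.lower s)
   | none => false)

def pvP1 (pref : String) (r : List (String × String)) : Bool :=
  let exch := PySem.Str.upper ((pvGet r "exchange").getD "")
  (pref == "NSE" && (PySem.Str.isIn "NS" exch || PySem.Str.isIn "NSE" exch)) ||
  (pref == "BSE" && (PySem.Str.isIn "BO" exch || PySem.Str.isIn "BSE" exch || PySem.Str.isIn "BOM" exch))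

def pvP2 (pref : String) (r : List (String × String)) : Bool :=
  let sym := PySem.Str.upper ((pvGet r "symbol").getD "")
  (pref == "NSE" && PySem.Str.endswith sym ".NS") ||
  (pref == "BSE" && PySem.Str.endswith sym ".BO")

def pvP3 (r : List (String × String)) : Bool :=
  let q := pvGet r "quoteType"
  q == some "EQUITY" || q == some "ETF" || q == some "MUTUALFUND"

-- ===== PORT A =====
def pick_best_symbol (results : List (List (String × String))) (company_name : String) (preferred : String) : Option (List (String × String)) :=
  match results with
  | [] => none
  | r0 :: _ =>
    let pref := pvPref preferred
    let cn := PySem.Str.lower company_name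
    match results.find? (pvP0 cn) with
    | some r => some r
    | none =>
      match (if pref == "NSE" || pref == "BSE" then
               match results.find? (pvP1 pref) with
               | some r => some r
               | none => results.find? (pvP2 pref)
             else none) with
      | some r => some r
      | none =>
        match results.find? pvP3 with
        | some r => some r
        | none => some r0

-- ===== PORT B =====
-- priority rank of one result (0 best … 4 unranked)
def pvRank (cn : String) (pref : String) (r : List (String × String)) : Nat :=
  if pvP0 cn r then 0
  else if pvP1 pref r then 1
  else if pvP2 pref r then 2
  else if pvP3 r then 3
  else 4

def pick_best_symbol_alt (results : List (List (String × String))) (company_name : String) (preferred : String) : Option (List (String × String)) :=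
  match results with
  | [] => none
  | r0 :: rest =>
    let pref := pvPref preferred
    let cn := PySem.Str.lower company_name
    some (rest.foldl (fun bk r =>
      let k := pvRank cn pref r
      if k < bk.2 then (r, k) else bk)
      (r0, pvRank cn pref r0)).1

-- ===== PRECONDITION & SPEC =====
def Spec_pick_best_symbol (results : List (List (String × String))) (company_name : String) (preferred : String) (out : Option (List (String × String))) : Prop := out = pick_best_symbol_alt results company_name preferred
instance (results : List (List (String × String))) (company_name : String) (preferred : String) (out : Option (List (String × String))) : Decidable (Spec_pick_best_symbol results company_name preferred out) := by unfold Spec_pick_best_symbol; infer_instance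

-- ===== CLAIM (what is proved, stated in full; the proofs are below) =====
def Claim_equal_pick_best_symbol : Prop := ∀ (results : List (List (String × String))) (company_name : String) (preferred : String), Dom_pick_best_symbol results company_name preferred → Spec_pick_best_symbol results company_name preferred (pick_best_symbol results company_name preferred)

-- ===== LEMMAS AND PROOFS =====

-- the A-side chain of scans, as one Option expression over the whole list
def pvChainP (cn pref : String) (m : List (List (String × String))) : Option (List (String × String)) :=
  (m.find? (pvP0 cn)).or ((m.find? (pvP1 pref)).or ((m.find? (pvP2 pref)).or (m.find? pvP3)))

-- the same chain with "rank = k" predicates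
def pvChainQ (cn pref : String) (m : List (List (String × String))) : Option (List (String × String)) :=
  (m.find? (fun r => pvRank cn pref r == 0)).or
    ((m.find? (fun r => pvRank cn pref r == 1)).or
      ((m.find? (fun r => pvRank cn pref r == 2)).or
        ((m.find? (fun r => pvRank cn pref r == 3)).or
          (m.find? (fun r => pvRank cn pref r == 4)))))

theorem pvFind?_congr {α : Type} (p q : α → Bool) (l : List α)
    (h : ∀ x ∈ l, p x = q x) : l.find? p = l.find? q := by
  induction l with
  | nil => rfl
  | cons a t ih =>
    have ha := h a (List.mem_cons_self)
    cases hq : q a <;>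
      simp [ha, hq, ih (fun x hx => h x (List.mem_cons_of_mem a hx))]

theorem pvRank_cases (cn pref : String) (r : List (String × String)) :
    pvRank cn pref r = 0 ∨ pvRank cn pref r = 1 ∨ pvRank cn pref r = 2 ∨
    pvRank cn pref r = 3 ∨ pvRank cn pref r = 4 := by
  unfold pvRank; split_ifs <;> simp

theorem pvRank_eq0 (cn pref : String) (r : List (String × String)) :
    (pvRank cn pref r == 0) = pvP0 cn r := by
  unfold pvRank; split_ifs <;> simp_all

theorem pvRank_eq1 (cn pref : String) (r : List (String × String))
    (h0 : pvP0 cn r = false) : (pvRank cn pref r == 1) = pvP1 pref r := by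
  unfold pvRank; split_ifs <;> simp_all

theorem pvRank_eq2 (cn pref : String) (r : List (String × String))
    (h0 : pvP0 cn r = false) (h1 : pvP1 pref r = false) :
    (pvRank cn pref r == 2) = pvP2 pref r := by
  unfold pvRank; split_ifs <;> simp_all

theorem pvRank_eq3 (cn pref : String) (r : List (String × String))
    (h0 : pvP0 cn r = false) (h1 : pvP1 pref r = false) (h2 : pvP2 pref r = false) :
    (pvRank cn pref r == 3) = pvP3 r := by
  unfold pvRank; split_ifs <;> simp_all

theorem pvRank_eq4 (cn pref : String) (r : List (String × String))
    (h0 : pvP0 cn r = false) (h1 : pvP1 pref r = false) (h2 : pvP2 pref r = false)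
    (h3 : pvP3 r = false) : pvRank cn pref r = 4 := by
  unfold pvRank; split_ifs <;> simp_all

-- the Q-chain is the P-chain followed by the "unranked" scan
theorem pvChainPQ (cn pref : String) (m : List (List (String × String))) :
    pvChainQ cn pref m =
      (pvChainP cn pref m).or (m.find? (fun r => pvRank cn pref r == 4)) := by
  unfold pvChainQ pvChainP
  rw [pvFind?_congr _ _ m (fun x _ => pvRank_eq0 cn pref x)]
  rcases h0 : m.find? (pvP0 cn) with _ | r
  · have hm0 : ∀ x ∈ m, pvP0 cn x = false := by
      intro x hx; simpa using List.find?_eq_none.mp h0 x hx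
    rw [pvFind?_congr _ _ m (fun x hx => pvRank_eq1 cn pref x (hm0 x hx))]
    rcases h1 : m.find? (pvP1 pref) with _ | r
    · have hm1 : ∀ x ∈ m, pvP1 pref x = false := by
        intro x hx; simpa using List.find?_eq_none.mp h1 x hx
      rw [pvFind?_congr _ _ m (fun x hx => pvRank_eq2 cn pref x (hm0 x hx) (hm1 x hx))]
      rcases h2 : m.find? (pvP2 pref) with _ | r
      · have hm2 : ∀ x ∈ m, pvP2 pref x = false := by
          intro x hx; simpa using List.find?_eq_none.mp h2 x hx
        rw [pvFind?_congr _ _ m (fun x hx => pvRank_eq3 cn pref x (hm0 x hx) (hm1 x hx) (hm2 x hx))]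
        simp [Option.none_or]
      · simp [Option.some_or]
    · simp [Option.some_or]
  · simp [Option.some_or]

-- pushing one comparison into the Q-chain keeps its value
theorem pvChainQ_cons_cons (cn pref : String) (b x : List (String × String))
    (xs : List (List (String × String))) :
    pvChainQ cn pref (b :: x :: xs) =
      pvChainQ cn pref ((if pvRank cn pref x < pvRank cn pref b then x else b) :: xs) := by
  rcases pvRank_cases cn pref b with hb|hb|hb|hb|hb <;>
    rcases pvRank_cases cn pref x with hx|hx|hx|hx|hx <;>
      simp [pvChainQ, hb, hx, Option.some_or]

-- B's single pass computes the Q-chain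
theorem pvFold (cn pref : String) (l : List (List (String × String))) :
    ∀ b, pvChainQ cn pref (b :: l) =
      some ((l.foldl (fun bk r =>
        let k := pvRank cn pref r
        if k < bk.2 then (r, k) else bk) (b, pvRank cn pref b)).1) := by
  induction l with
  | nil =>
    intro b
    rcases pvRank_cases cn pref b with h|h|h|h|h <;>
      simp [pvChainQ, h]
  | cons x xs ih =>
    intro b
    rw [List.foldl_cons]
    by_cases hlt : pvRank cn pref x < pvRank cn pref b
    · have hs : (let k := pvRank cn pref x;
          if k < (b, pvRank cn pref b).2 then (x, k) else (b, pvRank cn pref b))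
          = (x, pvRank cn pref x) := by simp [hlt]
      rw [hs, ← ih x, pvChainQ_cons_cons cn pref b x xs, if_pos hlt]
    · have hs : (let k := pvRank cn pref x;
          if k < (b, pvRank cn pref b).2 then (x, k) else (b, pvRank cn pref b))
          = (b, pvRank cn pref b) := by simp [hlt]
      rw [hs, ← ih b, pvChainQ_cons_cons cn pref b x xs, if_neg hlt]

-- when pref is neither NSE nor BSE the exchange/suffix conditions never hold
theorem pvP1_false (pref : String) (r : List (String × String))
    (h : (pref == "NSE" || pref == "BSE") = false) : pvP1 pref r = false := by
  unfold pvP1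
  simp only [Bool.or_eq_false_iff, beq_eq_false_iff_ne] at h
  simp [h.1, h.2]

theorem pvP2_false (pref : String) (r : List (String × String))
    (h : (pref == "NSE" || pref == "BSE") = false) : pvP2 pref r = false := by
  unfold pvP2
  simp only [Bool.or_eq_false_iff, beq_eq_false_iff_ne] at h
  simp [h.1, h.2]

-- A's cascade of scans equals the Q-chain
theorem pvA_eq_chainQ (cn pref : String) (b : List (String × String))
    (l : List (List (String × String))) :
    (match (b :: l).find? (pvP0 cn) with
     | some r => some r
     | none =>
       match (if pref == "NSE" || pref == "BSE" then
                match (b :: l).find? (pvP1 pref) with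
                | some r => some r
                | none => (b :: l).find? (pvP2 pref)
              else none) with
       | some r => some r
       | none =>
         match (b :: l).find? pvP3 with
         | some r => some r
         | none => some b) = pvChainQ cn pref (b :: l) := by
  rw [pvChainPQ]
  unfold pvChainP
  rcases h0 : (b :: l).find? (pvP0 cn) with _ | r
  · have hm0 : ∀ x ∈ (b :: l), pvP0 cn x = false := by
      intro x hx; simpa using List.find?_eq_none.mp h0 x hx
    by_cases hnb : (pref == "NSE" || pref == "BSE") = true
    · rw [if_pos hnb]
      rcases h1 : (b :: l).find? (pvP1 pref) with _ | r
      · have hm1 : ∀ x ∈ (b :: l), pvP1 pref x = false := by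
          intro x hx; simpa using List.find?_eq_none.mp h1 x hx
        rcases h2 : (b :: l).find? (pvP2 pref) with _ | r
        · have hm2 : ∀ x ∈ (b :: l), pvP2 pref x = false := by
            intro x hx; simpa using List.find?_eq_none.mp h2 x hx
          rcases h3 : (b :: l).find? pvP3 with _ | r
          · have hm3 : ∀ x ∈ (b :: l), pvP3 x = false := by
              intro x hx; simpa using List.find?_eq_none.mp h3 x hx
            have hb4 : pvRank cn pref b = 4 :=
              pvRank_eq4 cn pref b (hm0 b (by simp)) (hm1 b (by simp))
                (hm2 b (by simp)) (hm3 b (by simp))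
            simp [hb4]
          · simp
        · simp
      · simp
    · rw [if_neg hnb]
      have h1 : (b :: l).find? (pvP1 pref) = none :=
        List.find?_eq_none.mpr (fun x _ => by
          simp [pvP1_false pref x (Bool.not_eq_true _ ▸ Bool.of_not_eq_true hnb)])
      have h2 : (b :: l).find? (pvP2 pref) = none :=
        List.find?_eq_none.mpr (fun x _ => by
          simp [pvP2_false pref x (Bool.not_eq_true _ ▸ Bool.of_not_eq_true hnb)])
      rw [h1, h2]
      rcases h3 : (b :: l).find? pvP3 with _ | r
      · have hm3 : ∀ x ∈ (b :: l), pvP3 x = false := by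
          intro x hx; simpa using List.find?_eq_none.mp h3 x hx
        have hb4 : pvRank cn pref b = 4 :=
          pvRank_eq4 cn pref b (hm0 b (by simp))
            (pvP1_false pref b (Bool.not_eq_true _ ▸ Bool.of_not_eq_true hnb))
            (pvP2_false pref b (Bool.not_eq_true _ ▸ Bool.of_not_eq_true hnb))
            (hm3 b (by simp))
        simp [hb4]
      · simp
  · simp

-- ===== VERDICT (by name: the statement is the Claim_ definition above) =====
theorem pick_best_symbol_spec : Claim_equal_pick_best_symbol := by
  intro results company_name preferred _hdom
  unfold Spec_pick_best_symbol
  cases results with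
  | nil => rfl
  | cons b l =>
    show pick_best_symbol (b :: l) company_name preferred
        = pick_best_symbol_alt (b :: l) company_name preferred
    exact (pvA_eq_chainQ (PySem.Str.lower company_name) (pvPref preferred) b l).trans
      (pvFold (PySem.Str.lower company_name) (pvPref preferred) l b)
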